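-- pv_equiv track=rewrite | github.com/kev5655/ti-nspire-scripts | exDisk1/findModul.py | findModul
-- ===== SOURCE A (Python) =====
-- def findModul(a, b):
--     teiler = []
--     for i in range(1, a - b + 1):
--         if (a - b) % i == 0:
--             teiler.append(i)
--
--     endResults = []
--     for j in teiler:
--         for q in range(0, a + 1):
--             if a - (q * j) == b:
--                 endResults.append(q)
--
--     return endResults
-- ===== SOURCE B (Python) =====
-- def findModul(a, b):
--     d = a - b
--     if d <= 0:
--         return []
--     small = []
--     large = []
--     i = 1
--     while i * i <= d:
--         if d % i == 0:
--             small.append(i)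
--             if i != d // i:
--                 large.append(d // i)
--         i += 1
--     return [q for q in large + small[::-1] if q <= a]
-- ===== Notes on version B (the rewrite author's own statement) =====
-- stated objective: faster
-- what changed: Replaces the O(d) trial division over all of 1..d plus a nested O(a) search loop per divisor with a sqrt(d) divisor-pair enumeration that emits each quotient q = d//i directly, assembling the result as large-divisors ++ reversed small-divisors and filtering q <= a.
import Mathlib
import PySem

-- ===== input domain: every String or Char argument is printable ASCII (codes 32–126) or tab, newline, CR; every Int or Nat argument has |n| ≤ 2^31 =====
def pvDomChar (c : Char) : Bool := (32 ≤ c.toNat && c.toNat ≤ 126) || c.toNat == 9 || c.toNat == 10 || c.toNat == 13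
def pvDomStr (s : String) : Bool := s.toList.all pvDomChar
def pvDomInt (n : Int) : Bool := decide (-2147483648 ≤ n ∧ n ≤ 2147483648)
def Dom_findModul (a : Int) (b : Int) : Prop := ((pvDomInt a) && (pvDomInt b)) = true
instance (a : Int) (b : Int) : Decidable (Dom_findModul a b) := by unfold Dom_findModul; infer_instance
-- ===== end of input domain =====

-- B replaces A's O(d) trial division plus O(a)-search per divisor by a sqrt(d) divisor-pair
-- enumeration emitting each quotient directly (objective: faster).

-- ===== PORT A =====
def findModul (a : Int) (b : Int) : List Int :=
  let teiler := (PySem.List.pyRange 1 (a - b + 1) 1).foldl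
    (fun acc i => if PySem.Int.mod (a - b) i = 0 then acc ++ [i] else acc) []
  teiler.foldl
    (fun acc j => (PySem.List.pyRange 0 (a + 1) 1).foldl
      (fun acc2 q => if a - q * j = b then acc2 ++ [q] else acc2) acc) []

-- ===== PORT B =====
-- the 'while i * i <= d' loop of Source B
def pvSqrtLoop (d : Int) (i : Int) (small large : List Int) : List Int × List Int :=
  if i * i ≤ d then
    if PySem.Int.mod d i = 0 then
      pvSqrtLoop d (i + 1) (small ++ [i])
        (if i ≠ PySem.Int.floordiv d i then large ++ [PySem.Int.floordiv d i] else large)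
    else pvSqrtLoop d (i + 1) small large
  else (small, large)
termination_by (d + 1 - i).toNat
decreasing_by
  all_goals
    have hle : i ≤ d := by nlinarith [mul_self_nonneg (2 * i - 1)]
    omega

def findModul_alt (a : Int) (b : Int) : List Int :=
  let d := a - b
  if d ≤ 0 then []
  else
    let p := pvSqrtLoop d 1 [] []
    (p.2 ++ p.1.reverse).filter (fun q => q ≤ a)

-- ===== PRECONDITION & SPEC =====
def Spec_findModul (a : Int) (b : Int) (out : List Int) : Prop := out = findModul_alt a b
instance (a : Int) (b : Int) (out : List Int) : Decidable (Spec_findModul a b out) := by unfold Spec_findModul; infer_instance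

-- ===== CLAIM (what is proved, stated in full; the proofs are below) =====
def Claim_equal_findModul : Prop := ∀ (a : Int) (b : Int), Dom_findModul a b → Spec_findModul a b (findModul a b)

-- ===== LEMMAS AND PROOFS =====

-- ascending list of the divisors of d = a - b, as A's first loop builds it
def ascDiv (d : Int) : List Int :=
  (PySem.List.pyRange 1 (d + 1) 1).filter (fun i => decide (PySem.Int.mod d i = 0))

-- the two lists Source B's while-loop has accumulated once it stops
def smallL (d : Int) : List Int :=
  (PySem.List.pyRange 1 (d + 1) 1).filter
    (fun j => decide (j * j ≤ d ∧ PySem.Int.mod d j = 0))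
def largeL (d : Int) : List Int :=
  ((PySem.List.pyRange 1 (d + 1) 1).filter
    (fun j => decide (j * j ≤ d ∧ PySem.Int.mod d j = 0 ∧ j * j ≠ d))).map (fun j => d / j)

lemma divq_facts {d j : Int} (hd : 0 < d) (hj : 1 ≤ j) (hdvd : j ∣ d) :
    d / j * j = d ∧ 1 ≤ d / j ∧ d / j ≤ d ∧ d / j ∣ d := by
  have h1 := Int.ediv_mul_cancel hdvd
  have hpos : 1 ≤ d / j := by nlinarith
  exact ⟨h1, hpos, by nlinarith, ⟨j, h1.symm⟩⟩

lemma pv_div_div {d x : Int} (hd : 0 < d) (hx : 1 ≤ x) (hdvd : x ∣ d) : d / (d / x) = x := by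
  have h1 := Int.ediv_mul_cancel hdvd
  have hpos : 1 ≤ d / x := by nlinarith
  calc d / (d / x) = (d / x) * x / (d / x) := by rw [h1]
    _ = x := Int.mul_ediv_cancel_left x (by omega)

lemma div_antitone {d x y : Int} (hd : 0 < d) (hx : 1 ≤ x) (hy : 1 ≤ y)
    (hxd : x ∣ d) (hyd : y ∣ d) (hxy : x < y) : d / y < d / x := by
  have h1 := Int.ediv_mul_cancel hxd
  have h2 := Int.ediv_mul_cancel hyd
  have px : 0 < d / x := by nlinarith
  have py : 0 < d / y := by nlinarith
  nlinarith

lemma mem_ascDiv {d j : Int} (hd : 0 < d) : j ∈ ascDiv d ↔ 1 ≤ j ∧ j ≤ d ∧ j ∣ d := by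
  unfold ascDiv
  rw [List.mem_filter, PySem.List.mem_pyRange_one]
  simp only [decide_eq_true_eq, PySem.Int.mod_eq_zero_iff_dvd]
  constructor
  · rintro ⟨⟨u1, u2⟩, u3⟩; exact ⟨u1, by omega, u3⟩
  · rintro ⟨u1, u2, u3⟩; exact ⟨⟨u1, by omega⟩, u3⟩

lemma pairwise_ascDiv (d : Int) : (ascDiv d).Pairwise (· < ·) :=
  (PySem.List.pairwise_lt_pyRange_one _ _).filter _

lemma mem_map_div {d x : Int} (hd : 0 < d) :
    x ∈ (ascDiv d).map (fun j => d / j) ↔ 1 ≤ x ∧ x ≤ d ∧ x ∣ d := by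
  simp only [List.mem_map, mem_ascDiv hd]
  constructor
  · rintro ⟨j, ⟨hj1, _, hj3⟩, rfl⟩
    obtain ⟨_, h2, h3, h4⟩ := divq_facts hd hj1 hj3
    exact ⟨h2, h3, h4⟩
  · rintro ⟨h1, h2, h3⟩
    obtain ⟨_, e2, e3, e4⟩ := divq_facts hd h1 h3
    exact ⟨d / x, ⟨e2, e3, e4⟩, pv_div_div hd h1 h3⟩

lemma pairwise_gt_map_div {d : Int} (hd : 0 < d) (l : List Int)
    (hs : l.Pairwise (· < ·)) (hm : ∀ x ∈ l, 1 ≤ x ∧ x ∣ d) :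
    (l.map (fun j => d / j)).Pairwise (· > ·) := by
  rw [List.pairwise_map]
  refine hs.imp_of_mem ?_
  intro a b ha hb hr
  obtain ⟨a1, a2⟩ := hm a ha
  obtain ⟨b1, b2⟩ := hm b hb
  exact div_antitone hd a1 b1 a2 b2 hr

lemma filter_eq_single (c : Int) :
    ∀ l : List Int, l.Nodup →
      l.filter (fun q => decide (q = c)) = if c ∈ l then [c] else [] := by
  intro l
  induction l with
  | nil => intro _; simp
  | cons x t ih =>
    intro hl
    rw [List.nodup_cons] at hl
    by_cases hx : x = c
    · subst hx
      rw [List.filter_cons_of_pos (by simp)]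
      have hnil : t.filter (fun q => decide (q = x)) = [] := by
        rw [List.filter_eq_nil_iff]
        intro q hq
        simp only [decide_eq_true_eq]
        rintro rfl; exact hl.1 hq
      simp [hnil]
    · rw [List.filter_cons_of_neg (by simp [hx]), ih hl.2]
      have hmem : (c ∈ x :: t) ↔ (c ∈ t) := by
        constructor
        · intro h
          rcases List.mem_cons.mp h with rfl | h2
          · exact absurd rfl hx
          · exact h2
        · exact List.mem_cons_of_mem x
      rw [if_congr hmem rfl rfl]

lemma inner_filter (a b j : Int) (hd : 0 < a - b) (hj : 1 ≤ j) (hdvd : j ∣ (a - b)) :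
    (PySem.List.pyRange 0 (a + 1) 1).filter (fun q => decide (a - q * j = b)) =
      if (a - b) / j ≤ a then [(a - b) / j] else [] := by
  obtain ⟨e1, e2, _, _⟩ := divq_facts hd hj hdvd
  have hstep : (PySem.List.pyRange 0 (a + 1) 1).filter (fun q => decide (a - q * j = b)) =
      (PySem.List.pyRange 0 (a + 1) 1).filter (fun q => decide (q = (a - b) / j)) := by
    apply List.filter_congr
    intro x _
    simp only [decide_eq_decide]
    constructor
    · intro h
      have hx : x * j = (a - b) / j * j := by linarith
      exact mul_right_cancel₀ (by omega) hx
    · rintro rfl; linarith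
  rw [hstep, filter_eq_single _ _ (PySem.List.nodup_pyRange_one _ _)]
  have hmem : ((a - b) / j ∈ PySem.List.pyRange 0 (a + 1) 1) ↔ ((a - b) / j ≤ a) := by
    rw [PySem.List.mem_pyRange_one]; omega
  rw [if_congr hmem rfl rfl]

lemma flatMap_if (a d : Int) : ∀ l : List Int,
    (l.flatMap fun j => if d / j ≤ a then [d / j] else []) =
      (l.map fun j => d / j).filter (fun x => decide (x ≤ a)) := by
  intro l
  induction l with
  | nil => simp
  | cons x t ih =>
    simp only [List.flatMap_cons, List.map_cons, List.filter_cons]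
    by_cases h : d / x ≤ a <;> simp [h, ih]

lemma A_char (a b : Int) (hd : 0 < a - b) :
    findModul a b =
      ((ascDiv (a - b)).map (fun j => (a - b) / j)).filter (fun x => decide (x ≤ a)) := by
  unfold findModul
  simp only [PySem.List.foldl_append_ite_eq_filter, List.nil_append,
    PySem.List.foldl_append_eq_flatMap]
  rw [show (PySem.List.pyRange 1 (a - b + 1) 1).filter
        (fun i => decide (PySem.Int.mod (a - b) i = 0)) = ascDiv (a - b) from rfl]
  rw [List.flatMap_congr (g := fun j => if (a - b) / j ≤ a then [(a - b) / j] else [])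
        (fun j hj => inner_filter a b j hd ((mem_ascDiv hd).mp hj).1
          ((mem_ascDiv hd).mp hj).2.2)]
  exact flatMap_if a (a - b) _

lemma sqrtLoop_spec (d : Int) (hd : 0 < d) :
    ∀ (n : Nat) (i : Int) (s l : List Int), (d + 1 - i).toNat = n → 1 ≤ i →
    pvSqrtLoop d i s l =
      (s ++ (PySem.List.pyRange i (d + 1) 1).filter
          (fun j => decide (j * j ≤ d ∧ PySem.Int.mod d j = 0)),
       l ++ ((PySem.List.pyRange i (d + 1) 1).filter
          (fun j => decide (j * j ≤ d ∧ PySem.Int.mod d j = 0 ∧ j * j ≠ d))).map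
            (fun j => d / j)) := by
  intro n
  induction n using Nat.strong_induction_on with
  | _ n ih =>
    intro i s l hn hi
    rw [pvSqrtLoop]
    by_cases h1 : i * i ≤ d
    · have hid : i ≤ d := by nlinarith
      rw [PySem.List.pyRange_one_cons (by omega : i < d + 1)]
      have hlt : (d + 1 - (i + 1)).toNat < n := by omega
      by_cases h2 : PySem.Int.mod d i = 0
      · have hdvd : i ∣ d := (PySem.Int.mod_eq_zero_iff_dvd d i).mp h2
        have hfd : PySem.Int.floordiv d i = d / i :=
          PySem.Int.floordiv_eq_ediv_of_pos (by omega)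
        rw [if_pos h1, if_pos h2]
        rw [List.filter_cons_of_pos (by simp [h1, h2])]
        by_cases h3 : i * i = d
        · have hieq : i = PySem.Int.floordiv d i := by
            rw [hfd]
            have : d / i = i := by rw [← h3]; exact Int.mul_ediv_cancel_left i (by omega)
            omega
          rw [if_neg (by simpa using hieq)]
          rw [List.filter_cons_of_neg (by simp [h3])]
          rw [ih _ hlt (i + 1) _ _ rfl (by omega)]
          simp
        · have hineq : i ≠ PySem.Int.floordiv d i := by
            rw [hfd]
            intro hc
            apply h3
            have := Int.ediv_mul_cancel hdvd
            rw [← hc] at this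
            exact this
          rw [if_pos hineq, hfd]
          rw [List.filter_cons_of_pos (by simp [h1, h2, h3])]
          rw [ih _ hlt (i + 1) _ _ rfl (by omega)]
          simp
      · rw [if_pos h1, if_neg h2]
        rw [List.filter_cons_of_neg (by simp [h2]), List.filter_cons_of_neg (by simp [h2])]
        exact ih _ hlt (i + 1) s l rfl (by omega)
    · rw [if_neg h1]
      have key : ∀ j : Int, j ∈ PySem.List.pyRange i (d + 1) 1 → ¬ (j * j ≤ d) := by
        intro j hj hc
        rw [PySem.List.mem_pyRange_one] at hj
        apply h1
        nlinarith
      rw [List.filter_eq_nil_iff.mpr (by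
            intro j hj
            simp only [decide_eq_true_eq]
            rintro ⟨hc, -⟩
            exact key j hj hc),
          List.filter_eq_nil_iff.mpr (by
            intro j hj
            simp only [decide_eq_true_eq]
            rintro ⟨hc, -⟩
            exact key j hj hc)]
      simp

lemma mem_smallL {d x : Int} (hd : 0 < d) :
    x ∈ smallL d ↔ 1 ≤ x ∧ x ∣ d ∧ x * x ≤ d := by
  unfold smallL
  rw [List.mem_filter, PySem.List.mem_pyRange_one]
  simp only [decide_eq_true_eq, PySem.Int.mod_eq_zero_iff_dvd]
  constructor
  · rintro ⟨⟨u1, _⟩, u3, u4⟩; exact ⟨u1, u4, u3⟩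
  · rintro ⟨u1, u2, u3⟩
    exact ⟨⟨u1, by nlinarith⟩, u3, u2⟩

lemma mem_largeL {d x : Int} (hd : 0 < d) :
    x ∈ largeL d ↔ 1 ≤ x ∧ x ∣ d ∧ d < x * x := by
  unfold largeL
  simp only [List.mem_map, List.mem_filter, PySem.List.mem_pyRange_one,
    decide_eq_true_eq, PySem.Int.mod_eq_zero_iff_dvd]
  constructor
  · rintro ⟨j, ⟨⟨hj1, _⟩, hsq, hdvd, hne⟩, rfl⟩
    obtain ⟨e1, e2, _, e4⟩ := divq_facts hd hj1 hdvd
    refine ⟨e2, e4, ?_⟩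
    have hjj : j * j < d := lt_of_le_of_ne hsq hne
    have hjlt : j < d / j := by
      by_contra hcon0
      have hcon : d / j ≤ j := not_lt.mp hcon0
      have hmul : d / j * j ≤ j * j := mul_le_mul_of_nonneg_right hcon (by omega)
      linarith
    have hfin := mul_lt_mul_of_pos_left hjlt (by omega : (0:Int) < d / j)
    linarith
  · rintro ⟨h1, h2, h3⟩
    obtain ⟨e1, e2, e3, e4⟩ := divq_facts hd h1 h2
    have hlt : d / x < x := by
      by_contra hcon0
      have hcon : x ≤ d / x := not_lt.mp hcon0
      have hmul : x * x ≤ d / x * x := mul_le_mul_of_nonneg_right hcon (by omega)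
      linarith
    have hsq2 : d / x * (d / x) < d := by
      have hfin := mul_lt_mul_of_pos_left hlt (by omega : (0:Int) < d / x)
      linarith
    refine ⟨d / x, ⟨⟨e2, by omega⟩, hsq2.le, e4, ne_of_lt hsq2⟩, pv_div_div hd h1 h2⟩

lemma B_main (d : Int) (hd : 0 < d) :
    largeL d ++ (smallL d).reverse = (ascDiv d).map (fun j => d / j) := by
  have hmemS : ∀ x ∈ (PySem.List.pyRange 1 (d + 1) 1).filter
      (fun j => decide (j * j ≤ d ∧ PySem.Int.mod d j = 0 ∧ j * j ≠ d)), 1 ≤ x ∧ x ∣ d := by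
    intro x hx
    rw [List.mem_filter, PySem.List.mem_pyRange_one] at hx
    simp only [decide_eq_true_eq, PySem.Int.mod_eq_zero_iff_dvd] at hx
    exact ⟨hx.1.1, hx.2.2.1⟩
  have pwL : (largeL d).Pairwise (· > ·) :=
    pairwise_gt_map_div hd _ ((PySem.List.pairwise_lt_pyRange_one _ _).filter _) hmemS
  have pwS : (smallL d).Pairwise (· < ·) :=
    (PySem.List.pairwise_lt_pyRange_one _ _).filter _
  have pwSR : ((smallL d).reverse).Pairwise (· > ·) := by
    rw [List.pairwise_reverse]
    exact pwS
  have pwLHS : (largeL d ++ (smallL d).reverse).Pairwise (· > ·) := by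
    rw [List.pairwise_append]
    refine ⟨pwL, pwSR, ?_⟩
    intro x hx y hy
    rw [List.mem_reverse] at hy
    obtain ⟨x1, _, x3⟩ := (mem_largeL hd).mp hx
    obtain ⟨y1, _, y3⟩ := (mem_smallL hd).mp hy
    nlinarith
  have pwRHS : ((ascDiv d).map (fun j => d / j)).Pairwise (· > ·) :=
    pairwise_gt_map_div hd _ (pairwise_ascDiv d)
      (fun x hx => ⟨((mem_ascDiv hd).mp hx).1, ((mem_ascDiv hd).mp hx).2.2⟩)
  have ndL : (largeL d ++ (smallL d).reverse).Nodup :=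
    pwLHS.imp (fun h => ne_of_gt h)
  have ndR : ((ascDiv d).map (fun j => d / j)).Nodup :=
    pwRHS.imp (fun h => ne_of_gt h)
  have hperm : (largeL d ++ (smallL d).reverse).Perm ((ascDiv d).map (fun j => d / j)) := by
    rw [List.perm_ext_iff_of_nodup ndL ndR]
    intro x
    rw [List.mem_append, List.mem_reverse, mem_largeL hd, mem_smallL hd, mem_map_div hd]
    constructor
    · rintro (⟨h1, h2, _⟩ | ⟨h1, h2, _⟩) <;> exact ⟨h1, Int.le_of_dvd hd h2, h2⟩
    · rintro ⟨h1, _, h3⟩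
      by_cases hc : x * x ≤ d
      · exact Or.inr ⟨h1, h3, hc⟩
      · exact Or.inl ⟨h1, h3, by omega⟩
  exact List.Perm.eq_of_pairwise
    (fun a b _ _ h1 h2 => absurd h2 (not_lt.mpr h1.le)) pwLHS pwRHS hperm

lemma B_char (a b : Int) (hd : 0 < a - b) :
    findModul_alt a b =
      ((ascDiv (a - b)).map (fun j => (a - b) / j)).filter (fun x => decide (x ≤ a)) := by
  show (if a - b ≤ 0 then ([] : List Int)
        else ((pvSqrtLoop (a - b) 1 [] []).2 ++ (pvSqrtLoop (a - b) 1 [] []).1.reverse).filter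
          (fun q => decide (q ≤ a))) = _
  rw [if_neg (by omega)]
  rw [sqrtLoop_spec (a - b) hd (a - b + 1 - 1).toNat 1 [] [] rfl le_rfl]
  simp only [List.nil_append]
  rw [show ((PySem.List.pyRange 1 (a - b + 1) 1).filter
        (fun j => decide (j * j ≤ a - b ∧ PySem.Int.mod (a - b) j = 0 ∧ j * j ≠ a - b))).map
          (fun j => (a - b) / j) = largeL (a - b) from rfl,
      show (PySem.List.pyRange 1 (a - b + 1) 1).filter
        (fun j => decide (j * j ≤ a - b ∧ PySem.Int.mod (a - b) j = 0)) = smallL (a - b) from rfl]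
  rw [B_main (a - b) hd]

-- ===== VERDICT (by name: the statement is the Claim_ definition above) =====
theorem findModul_spec : Claim_equal_findModul := by
  intro a b _
  unfold Spec_findModul
  by_cases hd : a - b ≤ 0
  · have hA : findModul a b = [] := by
      unfold findModul
      rw [PySem.List.pyRange_one_eq_nil (by omega)]
      simp
    have hB : findModul_alt a b = [] := by
      unfold findModul_alt
      simp [hd]
    rw [hA, hB]
  · rw [A_char a b (by omega), B_char a b (by omega)]
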